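-- pv_equiv track=rewrite | github.com/PHAMTIEN04/Learn-Python | BT HUSC/BTHanh3/mymodule.py | las_position
-- ===== SOURCE A (Python) =====
-- def las_position(S1,S2):
--     count = 0
--     check = False
--
--     for i in range(len(S2)):
--         for j in range(len(S1)):
--             if S2[i] == S1[j] :
--                 count = j
--                 check = True
--
--     if check == False:
--         return -1
--     return count
-- ===== SOURCE B (Python) =====
-- def las_position(S1, S2):
--     for i in range(len(S2) - 1, -1, -1):
--         c = S2[i]
--         if c in S1:
--             return S1.rindex(c)
--     return -1
-- ===== Notes on version B (the rewrite author's own statement) =====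
-- stated objective: faster
-- what changed: Replaces A's exhaustive nested double scan (which keeps overwriting count) with a short-circuiting reverse pass over S2 that returns S1.rindex(c) at the first character present in S1, so on typical inputs it stops after a few characters instead of always doing len(S1)*len(S2) comparisons.
import Mathlib
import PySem

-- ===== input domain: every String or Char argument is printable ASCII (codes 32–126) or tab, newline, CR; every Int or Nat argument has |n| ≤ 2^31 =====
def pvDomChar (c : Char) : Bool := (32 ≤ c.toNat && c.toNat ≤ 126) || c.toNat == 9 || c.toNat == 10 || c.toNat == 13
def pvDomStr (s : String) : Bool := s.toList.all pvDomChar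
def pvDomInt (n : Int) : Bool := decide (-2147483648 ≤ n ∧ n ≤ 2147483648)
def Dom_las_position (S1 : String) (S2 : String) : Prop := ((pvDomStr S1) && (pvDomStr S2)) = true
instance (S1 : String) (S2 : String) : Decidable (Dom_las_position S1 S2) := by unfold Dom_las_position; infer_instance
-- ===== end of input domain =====

-- B replaces A's exhaustive nested double scan with a short-circuiting reverse pass over S2
-- that returns S1.rindex(c) at the first character found in S1 (objective: simpler).

-- ===== PORT A =====
-- inner loop: for j in range(len(S1)): if S2[i] == S1[j]: count = j; check = True
def pvInnerA (c : Char) (s : Int × Bool) (l1 : List Char) : Int × Bool :=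
  (l1.zipIdx).foldl (fun st p => if c = p.1 then ((p.2 : Int), true) else st) s

def las_position (S1 : String) (S2 : String) : Int :=
  let st := S2.toList.foldl (fun s c => pvInnerA c s S1.toList) ((0 : Int), false)
  if st.2 = false then -1 else st.1

-- ===== PORT B =====
-- S1.rindex(c), called only when c ∈ S1: last index of c = len - 1 - (index of c in the reverse)
def pvRindex (l : List Char) (c : Char) : Int :=
  ((l.length - 1 - l.reverse.findIdx (· == c) : Nat) : Int)

-- the reverse loop over S2: return on the first character present in S1
def pvGoB (l1 : List Char) : List Char → Int
  | [] => -1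
  | c :: rest => if c ∈ l1 then pvRindex l1 c else pvGoB l1 rest

def las_position_alt (S1 : String) (S2 : String) : Int :=
  pvGoB S1.toList S2.toList.reverse

-- ===== PRECONDITION & SPEC =====
def Spec_las_position (S1 : String) (S2 : String) (out : Int) : Prop := out = las_position_alt S1 S2
instance (S1 : String) (S2 : String) (out : Int) : Decidable (Spec_las_position S1 S2 out) := by unfold Spec_las_position; infer_instance

-- ===== CLAIM (what is proved, stated in full; the proofs are below) =====
def Claim_equal_las_position : Prop := ∀ (S1 : String) (S2 : String), Dom_las_position S1 S2 → Spec_las_position S1 S2 (las_position S1 S2)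

-- ===== LEMMAS AND PROOFS =====

theorem pvInnerA_not_mem (c : Char) (l : List Char) (h : c ∉ l) :
    ∀ (n : Nat) (s : Int × Bool),
      (l.zipIdx n).foldl (fun st p => if c = p.1 then ((p.2 : Int), true) else st) s = s := by
  induction l with
  | nil => intro n s; simp
  | cons a l ih =>
      intro n s
      simp only [List.zipIdx_cons, List.foldl_cons]
      have hca : c ≠ a := fun hc => h (hc ▸ List.mem_cons_self)
      rw [if_neg hca]
      exact ih (fun hm => h (List.mem_cons_of_mem _ hm)) (n + 1) s

theorem pvInnerA_mem (c : Char) (l : List Char) (h : c ∈ l) :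
    ∀ (n : Nat) (s : Int × Bool),
      (l.zipIdx n).foldl (fun st p => if c = p.1 then ((p.2 : Int), true) else st) s
        = (((n + (l.length - 1 - l.reverse.findIdx (· == c)) : Nat) : Int), true) := by
  induction l with
  | nil => cases h
  | cons a l ih =>
      intro n s
      simp only [List.zipIdx_cons, List.foldl_cons]
      by_cases hm : c ∈ l
      · rw [ih hm (n + 1)]
        have hlt : l.reverse.findIdx (· == c) < l.reverse.length :=
          List.findIdx_lt_length.mpr ⟨c, List.mem_reverse.mpr hm, by simp⟩
        have hfa : (l.reverse ++ [a]).findIdx (· == c) = l.reverse.findIdx (· == c) := by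
          rw [List.findIdx_append, if_pos hlt]
        have : (a :: l).reverse = l.reverse ++ [a] := by simp
        rw [this, hfa]
        congr 2
        simp only [List.length_reverse] at hlt
        simp only [List.length_cons]
        omega
      · have hca : c = a := by
          rcases List.mem_cons.mp h with h1 | h2
          · exact h1
          · exact absurd h2 hm
        rw [if_pos hca]
        rw [pvInnerA_not_mem c l hm (n + 1)]
        have hfr : l.reverse.findIdx (· == c) = l.reverse.length := by
          apply List.findIdx_eq_length.mpr
          intro x hx
          simp only [beq_eq_false_iff_ne, ne_eq]
          intro hxc
          exact hm (List.mem_reverse.mp (hxc ▸ hx))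
        have : (a :: l).reverse = l.reverse ++ [a] := by simp
        rw [this]
        have hfa : (l.reverse ++ [a]).findIdx (· == c) = l.reverse.length := by
          rw [List.findIdx_append, hfr]
          simp [hca]
        rw [hfa]
        congr 2
        simp only [List.length_cons, List.length_reverse]
        omega

theorem pv_outer (l1 : List Char) : ∀ (l2 : List Char),
    (let st := l2.foldl (fun s c => pvInnerA c s l1) ((0 : Int), false)
     if st.2 = false then -1 else st.1) = pvGoB l1 l2.reverse := by
  intro l2
  induction l2 using List.reverseRecOn with
  | nil => simp [pvGoB]
  | append_singleton l a ih =>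
      simp only [List.foldl_append, List.foldl_cons, List.foldl_nil, List.reverse_append,
        List.reverse_singleton, List.singleton_append]
      by_cases hm : a ∈ l1
      · simp only [pvGoB, if_pos hm, pvInnerA, pvInnerA_mem a l1 hm 0, pvRindex]
        simp
      · simp only [pvGoB, if_neg hm, pvInnerA, pvInnerA_not_mem a l1 hm 0]
        exact ih

-- ===== VERDICT (by name: the statement is the Claim_ definition above) =====
theorem las_position_spec : Claim_equal_las_position := by
  intro S1 S2 _
  unfold Spec_las_position las_position las_position_alt
  exact pv_outer S1.toList S2.toList
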